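-- pv_equiv track=rewrite | github.com/shreevatsa/sanskrit | read/filters.py | split_verses_at_br
-- ===== SOURCE A (Python) =====
-- def split_verses_at_br(text):
--   """Assume that <BR> by itself on a line is what separates verses."""
--   lines = text.split('\n')
--   verses = []
--   current_verse_lines = []
--   for line in lines:
--     if line == '<BR>':
--       if current_verse_lines:
--         verses.append('\n'.join(current_verse_lines))
--       current_verse_lines = []
--     else:
--       current_verse_lines.append(line)
--   if current_verse_lines:
--     verses.append('\n'.join(current_verse_lines))
--   return verses
-- ===== SOURCE B (Python) =====
-- def split_verses_at_br(text):
--   """Split into verses: maximal runs of lines between '<BR>' separator lines."""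
--   def go(lines):
--     if not lines:
--       return []
--     if lines[0] == '<BR>':
--       return go(lines[1:])
--     j = lines.index('<BR>') if '<BR>' in lines else len(lines)
--     return ['\n'.join(lines[:j])] + go(lines[j + 1:])
--   return go(text.split('\n'))
-- ===== Notes on version B (the rewrite author's own statement) =====
-- stated objective: alternative
-- what changed: Replaced the accumulator loop (pending-lines buffer plus end-of-loop flush) by a recursive decomposition that skips leading '<BR>' lines and slices off one whole verse at a time via list.index.
import Mathlib
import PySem

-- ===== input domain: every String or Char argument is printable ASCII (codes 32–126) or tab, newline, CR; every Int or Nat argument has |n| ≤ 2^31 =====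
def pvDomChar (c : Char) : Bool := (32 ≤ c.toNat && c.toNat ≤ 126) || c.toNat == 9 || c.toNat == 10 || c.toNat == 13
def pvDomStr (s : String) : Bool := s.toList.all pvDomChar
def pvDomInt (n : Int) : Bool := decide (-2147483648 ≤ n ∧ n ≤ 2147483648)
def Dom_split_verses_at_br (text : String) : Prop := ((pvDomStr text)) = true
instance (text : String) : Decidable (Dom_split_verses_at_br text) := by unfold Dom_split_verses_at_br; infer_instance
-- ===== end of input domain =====

-- B replaces A's pending-buffer loop by recursion that slices off one verse at a time (alternative decomposition, same cost).

-- ===== PORT A =====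
-- the loop body: state = (verses, current_verse_lines)
def pvStepA (st : List String × List String) (line : String) : List String × List String :=
  if line = "<BR>" then
    (if st.2 = [] then st.1 else st.1 ++ [PySem.Str.join "\n" st.2], [])
  else (st.1, st.2 ++ [line])

def split_verses_at_br (text : String) : List String :=
  let lines : List String := (PySem.Str.split? text "\n").getD []  -- sep "\n" ≠ "": split? is always some
  let st := lines.foldl pvStepA ([], [])
  if st.2 = [] then st.1 else st.1 ++ [PySem.Str.join "\n" st.2]

-- ===== PORT B =====
-- the conditional expression computing j: lines.index('<BR>') if '<BR>' in lines else len(lines)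
def pvIdxB (lines : List String) : Nat :=
  if "<BR>" ∈ lines then (PySem.List.index? lines "<BR>").getD 0 else lines.length

def pvGoB (lines : List String) : List String :=
  match lines with
  | [] => []
  | l :: rest =>
    if l = "<BR>" then pvGoB (PySem.List.slice (l :: rest) (some 1) none)
    else
      PySem.Str.join "\n" (PySem.List.slice (l :: rest) none (some (pvIdxB (l :: rest) : Int)))
        :: pvGoB (PySem.List.slice (l :: rest) (some ((pvIdxB (l :: rest) : Int) + 1)) none)
termination_by lines.length
decreasing_by
  · simp [PySem.List.slice_from_one]
  · have h1 : ((pvIdxB (l :: rest) : Int) + 1) = (((pvIdxB (l :: rest) + 1 : Nat)) : Int) := by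
      push_cast; ring
    rw [h1, PySem.List.slice_from_natCast]
    simp [List.length_drop]

def split_verses_at_br_alt (text : String) : List String :=
  pvGoB ((PySem.Str.split? text "\n").getD [])

-- ===== PRECONDITION & SPEC =====
def Spec_split_verses_at_br (text : String) (out : List String) : Prop := out = split_verses_at_br_alt text
instance (text : String) (out : List String) : Decidable (Spec_split_verses_at_br text out) := by unfold Spec_split_verses_at_br; infer_instance

-- ===== CLAIM (what is proved, stated in full; the proofs are below) =====
def Claim_equal_split_verses_at_br : Prop := ∀ (text : String), Dom_split_verses_at_br text → Spec_split_verses_at_br text (split_verses_at_br text)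

-- ===== LEMMAS AND PROOFS =====

-- A's result expressed recursively, with the pending buffer as an argument
def pvF (lines : List String) (cur : List String) : List String :=
  match lines with
  | [] => if cur = [] then [] else [PySem.Str.join "\n" cur]
  | l :: ls =>
    if l = "<BR>" then (if cur = [] then [] else [PySem.Str.join "\n" cur]) ++ pvF ls []
    else pvF ls (cur ++ [l])

theorem pvFoldA_eq_pvF (lines : List String) (verses cur : List String) :
    (if (lines.foldl pvStepA (verses, cur)).2 = []
     then (lines.foldl pvStepA (verses, cur)).1
     else (lines.foldl pvStepA (verses, cur)).1
          ++ [PySem.Str.join "\n" (lines.foldl pvStepA (verses, cur)).2])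
    = verses ++ pvF lines cur := by
  induction lines generalizing verses cur with
  | nil => simp only [List.foldl_nil, pvF]; split <;> simp
  | cons l ls ih =>
    by_cases hl : l = "<BR>" <;> by_cases hc : cur = [] <;>
      simp [pvF, pvStepA, hl, hc, ih, List.append_assoc]

-- a BR-free segment is just absorbed into the pending buffer
theorem pvF_absorb (seg : List String) (h : "<BR>" ∉ seg) (rest cur : List String) :
    pvF (seg ++ rest) cur = pvF rest (cur ++ seg) := by
  induction seg generalizing cur with
  | nil => simp
  | cons s ss ih =>
    have hs : s ≠ "<BR>" := fun hh => h (hh ▸ List.mem_cons_self)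
    have hss : "<BR>" ∉ ss := fun hh => h (List.mem_cons_of_mem _ hh)
    simp only [List.cons_append, pvF, if_neg hs, ih hss]
    simp

theorem pvF_eq_pvGoB (lines : List String) : pvF lines [] = pvGoB lines := by
  induction lines using pvGoB.induct with
  | case1 => simp [pvF, pvGoB]
  | case2 x1 x2 =>
    simp only [PySem.List.slice_from_one, List.tail_cons] at x2
    rw [pvGoB, if_pos rfl, PySem.List.slice_from_one, List.tail_cons]
    simp [pvF, x2]
  | case3 l rest hl ih =>
    rw [pvGoB, if_neg hl]
    by_cases hmem : "<BR>" ∈ (l :: rest)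
    · obtain ⟨k, hk⟩ := Option.isSome_iff_exists.mp
        ((PySem.List.index?_isSome_iff (l :: rest) "<BR>").mpr hmem)
      obtain ⟨pre, suf, hdec, hlen, hpre⟩ := (PySem.List.index?_eq_some_iff _ _ _).mp hk
      have hjval : pvIdxB (l :: rest) = k := by
        unfold pvIdxB; rw [if_pos hmem, hk]; rfl
      have hpre_ne : pre ≠ [] := by
        intro h0; rw [h0] at hdec; simp at hdec; exact hl hdec.1
      have hslice1 : PySem.List.slice (l :: rest) none (some (pvIdxB (l :: rest) : Int)) = pre := by
        rw [hjval, ← hlen, PySem.List.slice_to_natCast, hdec, List.take_left]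
      have hslice2 : PySem.List.slice (l :: rest) (some ((pvIdxB (l :: rest) : Int) + 1)) none = suf := by
        have h1 : ((pvIdxB (l :: rest) : Int) + 1) = (((pvIdxB (l :: rest) + 1 : Nat)) : Int) := by
          push_cast; ring
        rw [h1, PySem.List.slice_from_natCast, hjval, ← hlen, hdec]
        rw [show pre.length + 1 = (pre ++ ["<BR>"]).length by simp]
        rw [show pre ++ "<BR>" :: suf = (pre ++ ["<BR>"]) ++ suf by simp]
        exact List.drop_left
      rw [hslice2] at ih
      rw [hslice1, hslice2]
      rw [hdec, pvF_absorb pre hpre ("<BR>" :: suf) []]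
      simp [pvF, hpre_ne, ih]
    · have hjval : pvIdxB (l :: rest) = (l :: rest).length := by unfold pvIdxB; simp [hmem]
      have hslice1 : PySem.List.slice (l :: rest) none (some (pvIdxB (l :: rest) : Int)) = l :: rest := by
        rw [hjval, PySem.List.slice_to_natCast]; simp
      have hslice2 : PySem.List.slice (l :: rest) (some ((pvIdxB (l :: rest) : Int) + 1)) none = [] := by
        have h1 : ((pvIdxB (l :: rest) : Int) + 1) = (((pvIdxB (l :: rest) + 1 : Nat)) : Int) := by
          push_cast; ring
        rw [h1, PySem.List.slice_from_natCast]
        apply List.drop_eq_nil_of_le; omega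
      rw [hslice1, hslice2]
      have hall : pvF ((l :: rest) ++ []) [] = pvF [] ([] ++ (l :: rest)) :=
        pvF_absorb (l :: rest) hmem [] []
      simp only [List.append_nil, List.nil_append] at hall
      rw [hall]
      simp [pvF, pvGoB]

-- ===== VERDICT (by name: the statement is the Claim_ definition above) =====
theorem split_verses_at_br_spec : Claim_equal_split_verses_at_br := by
  intro text _
  unfold Spec_split_verses_at_br split_verses_at_br split_verses_at_br_alt
  rw [pvFoldA_eq_pvF, pvF_eq_pvGoB, List.nil_append]
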